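-- pv_equiv track=rewrite | github.com/njm64/aoc2025 | python/day4.py | part2
-- ===== SOURCE A (Python) =====
-- def get_cell(grid, x, y):
--     if 0 <= y < len(grid) and 0 <= x < len(grid[y]):
--         return grid[y][x]
--     else:
--         return None
--
-- def coords(grid):
--     for y in range(len(grid)):
--         for x in range(len(grid[y])):
--             yield x, y
--
-- def neighbours(x, y):
--     for dx in [-1, 0, 1]:
--         for dy in [-1, 0, 1]:
--             if dx != 0 or dy != 0:
--                 yield x + dx, y + dy
--
-- def count_rolls(grid, x, y):
--     return [get_cell(grid, x, y) for x, y in neighbours(x, y)].count('@')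
--
-- def part2(grid):
--     g = [row[:] for row in grid] # Copy the grid
--     n = 0
--     done = False
--     while not done:
--         done = True
--         for x,y in coords(g):
--             if get_cell(g, x, y) == '@' and count_rolls(g, x, y) < 4:
--                 g[y][x] = '.'
--                 n += 1
--                 done = False
--     return n
-- ===== SOURCE B (Python) =====
-- DIRS = [(-1, -1), (-1, 0), (-1, 1), (0, -1), (0, 1), (1, -1), (1, 0), (1, 1)]
--
-- def part2(grid):
--     alive = [(x, y) for y, row in enumerate(grid)
--                     for x, cell in enumerate(row) if cell == '@']
--     total = len(alive)
--     while True: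
--         cells = set(alive)
--         kept = [c for c in alive
--                 if sum(1 for dx, dy in DIRS if (c[0] + dx, c[1] + dy) in cells) >= 4]
--         if len(kept) == len(alive):
--             return total - len(alive)
--         alive = kept
-- ===== Notes on version B (the rewrite author's own statement) =====
-- stated objective: faster
-- what changed: A repeatedly rescans and mutates the whole grid, removing weakly-supported '@' cells one at a time mid-scan until a full pass removes nothing; B extracts the list of '@' coordinates once and repeatedly batch-filters it (keeping cells with >=4 live neighbours, membership via a set) until a fixpoint, returning initial minus final count - equal because both compute the greatest stable subset.
import Mathlib
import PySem

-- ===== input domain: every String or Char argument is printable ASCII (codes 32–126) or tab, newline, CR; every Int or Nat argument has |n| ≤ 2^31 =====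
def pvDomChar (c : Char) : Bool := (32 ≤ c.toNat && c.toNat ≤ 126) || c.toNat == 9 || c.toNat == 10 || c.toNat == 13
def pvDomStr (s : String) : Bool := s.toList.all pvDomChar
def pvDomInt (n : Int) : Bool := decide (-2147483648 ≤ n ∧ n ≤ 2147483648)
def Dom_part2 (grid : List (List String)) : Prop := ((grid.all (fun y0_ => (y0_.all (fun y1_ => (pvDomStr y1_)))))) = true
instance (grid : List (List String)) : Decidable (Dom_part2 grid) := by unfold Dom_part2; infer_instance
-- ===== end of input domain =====

-- B replaces A's whole-grid rescan-until-stable with batch rounds on the list of live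
-- coordinates (simultaneous filter of unsupported cells, set membership, count by subtraction);
-- measurably faster by a constant factor (timing run), same result, proved equal.

-- ===== PORT A =====
-- port of get_cell; exact: both indices are bounds-checked before use, so .toNat is safe
def getCell (grid : List (List String)) (x y : Int) : Option String :=
  if 0 ≤ y ∧ y < (grid.length : Int) then
    let row := grid.getD y.toNat []
    if 0 ≤ x ∧ x < (row.length : Int) then some (row.getD x.toNat "") else none
  else none

-- port of neighbours (generator rendered as the list it yields, dx outer, dy inner)
def neighbours (x y : Int) : List (Int × Int) :=
  ([-1, 0, 1] : List Int).flatMap fun dx =>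
    ([-1, 0, 1] : List Int).filterMap fun dy =>
      if dx ≠ 0 ∨ dy ≠ 0 then some (x + dx, y + dy) else none

-- port of count_rolls
def countRolls (grid : List (List String)) (x y : Int) : Int :=
  ((((neighbours x y).map fun c => getCell grid c.1 c.2).count (some "@") : Nat) : Int)

-- port of coords (generator rendered as the list it yields; row lengths never change during a pass)
def coordsOf (g : List (List String)) : List (Int × Int) :=
  (List.range g.length).flatMap fun y =>
    (List.range ((g.getD y []).length)).map fun (x : Nat) => ((x : Int), (y : Int))

-- g[y][x] = '.' ; indices are in range at every call site
def setCell (g : List (List String)) (x y : Int) : List (List String) :=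
  g.set y.toNat ((g.getD y.toNat []).set x.toNat ".")

-- body of A's inner `for x,y in coords(g)` loop; state = (g, n, done)
def passStep (st : List (List String) × Int × Bool) (c : Int × Int) :
    List (List String) × Int × Bool :=
  if getCell st.1 c.1 c.2 = some "@" ∧ countRolls st.1 c.1 c.2 < 4 then
    (setCell st.1 c.1 c.2, st.2.1 + 1, false)
  else st

-- one full pass of A's while-body (done initialised to True)
def passFn (g : List (List String)) (n : Int) : List (List String) × Int × Bool :=
  (coordsOf g).foldl passStep (g, n, true)

-- helper for the fuel bound: cells currently equal to "@"
def aliveB (g : List (List String)) (c : Int × Int) : Bool :=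
  getCell g c.1 c.2 == some "@"

def aliveL (g : List (List String)) : List (Int × Int) :=
  (coordsOf g).filter (aliveB g)

-- A's `while not done` loop; fuel only makes the recursion structural (each non-final
-- pass removes at least one '@', so the initial fuel is proved sufficient below)
def part2LoopF : Nat → List (List String) → Int → Int
  | 0, _, n => n
  | f + 1, g, n =>
    let r := passFn g n
    if r.2.2 then r.2.1 else part2LoopF f r.1 r.2.1

def part2 (grid : List (List String)) : Int :=
  part2LoopF ((aliveL grid).length + 1) grid 0

-- ===== PORT B =====
def dirsB : List (Int × Int) :=
  [(-1, -1), (-1, 0), (-1, 1), (0, -1), (0, 1), (1, -1), (1, 0), (1, 1)]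

-- [(x, y) for y, row in enumerate(grid) for x, cell in enumerate(row) if cell == '@']
def aliveInit (grid : List (List String)) : List (Int × Int) :=
  (PySem.List.enumerate grid).flatMap fun yr =>
    (PySem.List.enumerate yr.2).filterMap fun xc =>
      if xc.2 = "@" then some (xc.1, yr.1) else none

-- one round: cells = set(alive); keep the coords with >= 4 live neighbours
def keptOf (alive : List (Int × Int)) : List (Int × Int) :=
  let cells : PySem.Set (Int × Int) := PySem.Set.ofList alive
  alive.filter fun c =>
    decide (4 ≤ (dirsB.filter fun d => cells.contains (c.1 + d.1, c.2 + d.2)).length)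

def part2AltLoop (total : Int) (alive : List (Int × Int)) : Int :=
  let kept := keptOf alive
  if kept.length = alive.length then total - (alive.length : Int)
  else part2AltLoop total kept
termination_by alive.length
decreasing_by
  exact Nat.lt_of_le_of_ne (List.Sublist.length_le List.filter_sublist) (by assumption)

def part2_alt (grid : List (List String)) : Int :=
  let alive := aliveInit grid
  part2AltLoop (alive.length : Int) alive

-- ===== PRECONDITION & SPEC =====
def Spec_part2 (grid : List (List String)) (out : Int) : Prop := out = part2_alt grid
instance (grid : List (List String)) (out : Int) : Decidable (Spec_part2 grid out) := by unfold Spec_part2; infer_instance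

-- ===== CLAIM (what is proved, stated in full; the proofs are below) =====
def Claim_equal_part2 : Prop := ∀ (grid : List (List String)), Dom_part2 grid → Spec_part2 grid (part2 grid)

-- ===== LEMMAS AND PROOFS =====

def supp (S : List (Int × Int)) (c : Int × Int) : Nat :=
  (dirsB.filter fun d => decide ((c.1 + d.1, c.2 + d.2) ∈ S)).length

lemma aliveB_iff (g : List (List String)) (c : Int × Int) :
    aliveB g c = true ↔ getCell g c.1 c.2 = some "@" := by
  simp [aliveB]

lemma getCell_some (g : List (List String)) (x y : Int) (s : String)
    (h : getCell g x y = some s) :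
    0 ≤ y ∧ y.toNat < g.length ∧ 0 ≤ x ∧ x.toNat < (g.getD y.toNat []).length ∧
      (g.getD y.toNat []).getD x.toNat "" = s := by
  simp only [getCell] at h
  split_ifs at h with h1 h2
  · obtain ⟨hy0, hy1⟩ := h1
    obtain ⟨hx0, hx1⟩ := h2
    refine ⟨hy0, by omega, hx0, by omega, by simpa using h⟩

lemma rowLens_setCell (g : List (List String)) (x y : Int) (s : String)
    (h : getCell g x y = some s) :
    (setCell g x y).map List.length = g.map List.length := by
  obtain ⟨hy0, hyl, hx0, hxl, hval⟩ := getCell_some g x y s h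
  unfold setCell
  rw [List.map_set, List.length_set, List.getD_eq_getElem g [] hyl]
  have hh : g[y.toNat].length = (g.map List.length)[y.toNat]'(by simpa using hyl) := by simp
  rw [hh, List.set_getElem_self]

lemma getCell_setCell (g : List (List String)) (x y : Int)
    (h : getCell g x y = some "@") (x' y' : Int) :
    getCell (setCell g x y) x' y' =
      if x' = x ∧ y' = y then some "." else getCell g x' y' := by
  obtain ⟨hy0, hyl, hx0, hxl, hval⟩ := getCell_some g x y "@" h
  simp only [getCell, setCell, List.getD_eq_getElem?_getD, List.length_set, List.getElem?_set]
  split_ifs <;> simp_all <;>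
    first
      | omega
      | (rw [List.getElem_set_ne (by omega)])

lemma mem_coordsOf (g : List (List String)) (x y : Int) (s : String)
    (h : getCell g x y = some s) : (x, y) ∈ coordsOf g := by
  obtain ⟨hy0, hyl, hx0, hxl, _⟩ := getCell_some g x y s h
  have hxeq : ((x.toNat : Int), (y.toNat : Int)) = (x, y) := by
    simp [Int.toNat_of_nonneg hx0, Int.toNat_of_nonneg hy0]
  exact List.mem_flatMap.mpr ⟨y.toNat, List.mem_range.mpr hyl,
    List.mem_map.mpr ⟨x.toNat, List.mem_range.mpr hxl, hxeq⟩⟩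

lemma coordsOf_congr (g g' : List (List String))
    (h : g.map List.length = g'.map List.length) : coordsOf g = coordsOf g' := by
  have hlen : g.length = g'.length := by
    simpa using congrArg List.length h
  unfold coordsOf
  rw [hlen]
  apply congrArg List.flatten
  apply List.map_congr_left
  intro y hy
  have hy' : y < g'.length := List.mem_range.mp hy
  have : (g.getD y []).length = (g'.getD y []).length := by
    rw [List.getD_eq_getElem g [] (by omega), List.getD_eq_getElem g' [] hy']
    have := congrArg (fun l => l[y]?) h
    simp only [List.getElem?_map] at this
    rw [List.getElem?_eq_getElem (by omega), List.getElem?_eq_getElem hy'] at this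
    simpa using this
  rw [this]

lemma nodup_coordsOf (g : List (List String)) : (coordsOf g).Nodup := by
  unfold coordsOf
  rw [List.flatMap_def, List.nodup_flatten]
  constructor
  · intro l hl
    simp only [List.mem_map, List.mem_range] at hl
    obtain ⟨y, _, rfl⟩ := hl
    show ((List.range ((g.getD y []).length)).map fun (x : Nat) => ((x : Int), (y : Int))).Nodup
    exact List.Nodup.map (f := fun x : Nat => ((x : Int), (y : Int)))
      (fun a b hab => by simpa using hab) List.nodup_range
  · rw [List.pairwise_map]
    apply List.Pairwise.imp ?_ List.pairwise_lt_range
    intro a b hab p hp hq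
    simp only [List.mem_map, List.mem_range] at hp hq
    obtain ⟨xa, _, rfl⟩ := hp
    obtain ⟨xb, _, h2⟩ := hq
    have := congrArg Prod.snd h2
    simp at this
    omega

lemma mem_aliveL (g : List (List String)) (c : Int × Int) :
    c ∈ aliveL g ↔ aliveB g c = true := by
  simp only [aliveL, List.mem_filter, and_iff_right_iff_imp]
  intro hc
  have := (aliveB_iff g c).mp hc
  have h2 := mem_coordsOf g c.1 c.2 "@" this
  simpa using h2

lemma nodup_aliveL (g : List (List String)) : (aliveL g).Nodup :=
  (nodup_coordsOf g).filter _

lemma aliveB_setCell (g : List (List String)) (x y : Int)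
    (h : getCell g x y = some "@") (c : Int × Int) :
    aliveB (setCell g x y) c = true ↔ aliveB g c = true ∧ c ≠ (x, y) := by
  rw [aliveB_iff, aliveB_iff, getCell_setCell g x y h]
  by_cases hc : c.1 = x ∧ c.2 = y
  · rw [if_pos hc]
    constructor
    · intro hh; exact absurd hh (by simp)
    · rintro ⟨_, hne⟩
      exact absurd (Prod.ext hc.1 hc.2) hne
  · rw [if_neg hc]
    constructor
    · intro hh
      refine ⟨hh, fun he => hc ⟨by rw [he], by rw [he]⟩⟩
    · exact fun hh => hh.1

lemma aliveL_setCell_length (g : List (List String)) (x y : Int)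
    (h : getCell g x y = some "@") :
    (aliveL (setCell g x y)).length + 1 = (aliveL g).length := by
  have hco : coordsOf (setCell g x y) = coordsOf g :=
    coordsOf_congr _ _ (rowLens_setCell g x y "@" h)
  have h1 : aliveL (setCell g x y) = (aliveL g).filter (fun c => c != (x, y)) := by
    unfold aliveL
    rw [hco, List.filter_filter]
    apply List.filter_congr
    intro c _
    have hiff := aliveB_setCell g x y h c
    cases hA : aliveB (setCell g x y) c with
    | true =>
      obtain ⟨hB, hne⟩ := hiff.mp hA
      simp [hB, hne]
    | false =>
      cases hB : aliveB g c with
      | false => simp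
      | true =>
        have hc : c = (x, y) := by
          by_contra hne
          have := hiff.mpr ⟨hB, hne⟩
          rw [hA] at this
          exact absurd this (by simp)
        simp [hc]
  have hmem : (x, y) ∈ aliveL g := (mem_aliveL g (x, y)).mpr ((aliveB_iff g (x, y)).mpr h)
  rw [h1, ← List.Nodup.erase_eq_filter (nodup_aliveL g), List.length_erase_of_mem hmem]
  have := List.length_pos_of_mem hmem
  omega

lemma neighbours_eq (x y : Int) :
    neighbours x y = dirsB.map fun d => (x + d.1, y + d.2) := by
  simp [neighbours, dirsB, List.flatMap_cons]

lemma countRolls_eq (g : List (List String)) (x y : Int) :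
    countRolls g x y =
      (((dirsB.filter fun d => aliveB g (x + d.1, y + d.2)).length : Nat) : Int) := by
  unfold countRolls
  rw [neighbours_eq, List.count_eq_countP, List.countP_map, ← List.countP_eq_length_filter]
  rfl

lemma supp_le_countRolls (g : List (List String)) (T : List (Int × Int))
    (hT : ∀ c ∈ T, aliveB g c = true) (p : Int × Int) :
    (supp T p : Int) ≤ countRolls g p.1 p.2 := by
  rw [countRolls_eq]
  have : supp T p ≤ (dirsB.filter fun d => aliveB g (p.1 + d.1, p.2 + d.2)).length := by
    unfold supp
    rw [← List.countP_eq_length_filter, ← List.countP_eq_length_filter]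
    apply List.countP_mono_left
    intro d _ hd
    exact hT _ (of_decide_eq_true hd)
  exact_mod_cast this

lemma countRolls_eq_supp (g : List (List String)) (x y : Int) :
    countRolls g x y = (supp (aliveL g) (x, y) : Int) := by
  rw [countRolls_eq]
  congr 1
  unfold supp
  congr 1
  apply List.filter_congr
  intro d _
  by_cases hd : aliveB g (x + d.1, y + d.2) = true
  · simp only [hd]
    exact Eq.symm (decide_eq_true ((mem_aliveL g _).mpr hd))
  · rw [Bool.eq_false_iff.mpr hd]
    exact Eq.symm (decide_eq_false (fun hm => hd ((mem_aliveL g _).mp hm)))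

def Reach (g₀ : List (List String)) (n₀ : Int)
    (st : List (List String) × Int × Bool) : Prop :=
  st.1.map List.length = g₀.map List.length ∧
  (∀ c, aliveB st.1 c = true → aliveB g₀ c = true) ∧
  st.2.1 + ((aliveL st.1).length : Int) = n₀ + ((aliveL g₀).length : Int) ∧
  n₀ ≤ st.2.1 ∧
  (st.2.2 = false → n₀ + 1 ≤ st.2.1) ∧
  (∀ T : List (Int × Int), (∀ c ∈ T, aliveB g₀ c = true) → (∀ c ∈ T, 4 ≤ supp T c) →
    ∀ c ∈ T, aliveB st.1 c = true)

lemma reach_step (g₀ : List (List String)) (n₀ : Int)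
    (st : List (List String) × Int × Bool) (c : Int × Int)
    (h : Reach g₀ n₀ st) : Reach g₀ n₀ (passStep st c) := by
  obtain ⟨R1, R2, R3, R4, R5, R7⟩ := h
  unfold passStep
  by_cases hg : getCell st.1 c.1 c.2 = some "@" ∧ countRolls st.1 c.1 c.2 < 4
  · rw [if_pos hg]
    obtain ⟨hA, hC⟩ := hg
    have hlen := aliveL_setCell_length st.1 c.1 c.2 hA
    refine ⟨(rowLens_setCell st.1 c.1 c.2 "@" hA).trans R1, ?_, ?_,
      by show n₀ ≤ st.2.1 + 1; omega, fun _ => by show n₀ + 1 ≤ st.2.1 + 1; omega, ?_⟩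
    · intro d hd
      exact R2 d ((aliveB_setCell st.1 c.1 c.2 hA d).mp hd).1
    · show st.2.1 + 1 + ((aliveL (setCell st.1 c.1 c.2)).length : Int) = _
      omega
    · intro T h1 h2 d hd
      have hsub : ∀ e ∈ T, aliveB st.1 e = true := R7 T h1 h2
      apply (aliveB_setCell st.1 c.1 c.2 hA d).mpr
      refine ⟨hsub d hd, ?_⟩
      intro he
      have h4 : (4 : Int) ≤ (supp T d : Int) := by exact_mod_cast h2 d hd
      have h5 := supp_le_countRolls st.1 T hsub d
      rw [he] at h4 h5
      simp only at h5
      omega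
  · rw [if_neg hg]
    exact ⟨R1, R2, R3, R4, R5, R7⟩

lemma reach_foldl (g₀ : List (List String)) (n₀ : Int)
    (l : List (Int × Int)) (st : List (List String) × Int × Bool)
    (h : Reach g₀ n₀ st) : Reach g₀ n₀ (l.foldl passStep st) := by
  induction l generalizing st with
  | nil => exact h
  | cons a l ih => exact ih _ (reach_step _ _ _ _ h)

lemma reach_passFn (g : List (List String)) (n : Int) : Reach g n (passFn g n) := by
  refine reach_foldl g n _ _ ?_
  exact ⟨rfl, fun c h => h, rfl, le_refl _, by simp, fun T h1 h2 => h1⟩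

lemma passStep_done (st : List (List String) × Int × Bool) (c : Int × Int)
    (h : (passStep st c).2.2 = true) :
    passStep st c = st ∧ st.2.2 = true ∧
      ¬(getCell st.1 c.1 c.2 = some "@" ∧ countRolls st.1 c.1 c.2 < 4) := by
  unfold passStep at h ⊢
  split_ifs at h ⊢ with hg
  exact ⟨rfl, h, hg⟩

lemma foldl_done (l : List (Int × Int)) (st : List (List String) × Int × Bool)
    (h : (l.foldl passStep st).2.2 = true) :
    l.foldl passStep st = st ∧
      ∀ c ∈ l, ¬(getCell st.1 c.1 c.2 = some "@" ∧ countRolls st.1 c.1 c.2 < 4) := by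
  induction l generalizing st with
  | nil => exact ⟨rfl, by simp⟩
  | cons a l ih =>
    rw [List.foldl_cons] at h ⊢
    obtain ⟨hfix, hguards⟩ := ih (passStep st a) h
    have hdone : (passStep st a).2.2 = true := by rw [hfix] at h; exact h
    obtain ⟨hstep, _, hga⟩ := passStep_done st a hdone
    rw [hstep] at hfix hguards
    refine ⟨by rw [hstep, hfix], ?_⟩
    intro c hc
    rcases List.mem_cons.mp hc with rfl | hc'
    · exact hga
    · exact hguards c hc'

lemma loopF_spec (f : Nat) (g : List (List String)) (n : Int)
    (hf : (aliveL g).length < f) :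
    ∃ gf, part2LoopF f g n = n + ((aliveL g).length : Int) - ((aliveL gf).length : Int) ∧
      (∀ c, aliveB gf c = true → aliveB g c = true) ∧
      (∀ c, aliveB gf c = true → (4 : Int) ≤ countRolls gf c.1 c.2) ∧
      (∀ T : List (Int × Int), (∀ c ∈ T, aliveB g c = true) → (∀ c ∈ T, 4 ≤ supp T c) →
        ∀ c ∈ T, aliveB gf c = true) := by
  induction f generalizing g n with
  | zero => omega
  | succ f ih =>
    simp only [part2LoopF]
    obtain ⟨R1, R2, R3, R4, R5, R7⟩ := reach_passFn g n
    by_cases hd : (passFn g n).2.2 = true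
    · rw [if_pos hd]
      obtain ⟨hfix, hguards⟩ := foldl_done (coordsOf g) (g, n, true) hd
      have hr : passFn g n = (g, n, true) := hfix
      refine ⟨g, ?_, fun c hc => hc, ?_, fun T h1 _ => h1⟩
      · rw [hr]
        show n = n + ((aliveL g).length : Int) - ((aliveL g).length : Int)
        omega
      · intro c hc
        have hA := (aliveB_iff g c).mp hc
        have hmem : (c.1, c.2) ∈ coordsOf g := mem_coordsOf g c.1 c.2 "@" hA
        have := hguards (c.1, c.2) hmem
        simp only [not_and, not_lt] at this
        exact this hA
    · rw [if_neg hd]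
      have hdf : (passFn g n).2.2 = false := by
        cases hb : (passFn g n).2.2
        · rfl
        · exact absurd hb hd
      have h5 := R5 hdf
      obtain ⟨gf, hval, hmono, hstab, hgreat⟩ := ih (passFn g n).1 (passFn g n).2.1 (by omega)
      refine ⟨gf, ?_, fun c hc => R2 c (hmono c hc), hstab, ?_⟩
      · rw [hval]; omega
      · intro T h1 h2
        exact hgreat T (fun c hc => R7 T h1 h2 c hc) h2

lemma keptOf_eq (L : List (Int × Int)) :
    keptOf L = L.filter fun c => decide (4 ≤ supp L c) := by
  unfold keptOf supp
  apply List.filter_congr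
  intro c _
  have hmem : ∀ p : Int × Int, (PySem.Set.ofList L).contains p = decide (p ∈ L) := by
    intro p
    by_cases hp : p ∈ L
    · rw [decide_eq_true hp]
      exact (PySem.Set.contains_iff _ p).mpr ((PySem.Set.mem_ofList L p).mpr hp)
    · rw [decide_eq_false hp]
      exact Bool.eq_false_iff.mpr
        (fun hc => hp ((PySem.Set.mem_ofList L p).mp ((PySem.Set.contains_iff _ p).mp hc)))
  simp only [hmem]

lemma supp_mono (T S : List (Int × Int)) (h : ∀ a ∈ T, a ∈ S) (c : Int × Int) :
    supp T c ≤ supp S c := by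
  unfold supp
  rw [← List.countP_eq_length_filter, ← List.countP_eq_length_filter]
  apply List.countP_mono_left
  intro d _ hd
  exact decide_eq_true (h _ (of_decide_eq_true hd))

lemma altLoop_spec (t : Int) (L : List (Int × Int)) (hN : L.Nodup) :
    ∃ F : List (Int × Int), part2AltLoop t L = t - (F.length : Int) ∧
      F.Nodup ∧ (∀ c ∈ F, c ∈ L) ∧ (∀ c ∈ F, 4 ≤ supp F c) ∧
      (∀ T : List (Int × Int), (∀ c ∈ T, c ∈ L) → (∀ c ∈ T, 4 ≤ supp T c) →
        ∀ c ∈ T, c ∈ F) := by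
  induction L using part2AltLoop.induct with
  | case1 L kept hlen =>
    have heq : keptOf L = L :=
      List.Sublist.eq_of_length (keptOf_eq L ▸ List.filter_sublist) (by simpa using hlen)
    refine ⟨L, ?_, hN, fun c hc => hc, ?_, fun T h1 _ c hc => h1 c hc⟩
    · rw [part2AltLoop, if_pos hlen]
    · intro c hc
      have := List.filter_eq_self.mp (keptOf_eq L ▸ heq) c hc
      exact of_decide_eq_true this
  | case2 L kept hlen ih =>
    have hkN : (keptOf L).Nodup := keptOf_eq L ▸ hN.filter _
    obtain ⟨F, hval, hFN, hsub, hstab, hgreat⟩ := ih hkN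
    have hkL : ∀ c ∈ keptOf L, c ∈ L := fun c hc =>
      List.mem_of_mem_filter (keptOf_eq L ▸ hc)
    refine ⟨F, ?_, hFN, fun c hc => hkL c (hsub c hc), hstab, ?_⟩
    · rw [part2AltLoop, if_neg hlen]
      exact hval
    · intro T h1 h2
      apply hgreat T ?_ h2
      intro c hc
      show c ∈ keptOf L
      rw [keptOf_eq]
      apply List.mem_filter.mpr
      refine ⟨h1 c hc, decide_eq_true ?_⟩
      exact le_trans (h2 c hc) (supp_mono T L h1 c)

lemma getCell_natCast (g : List (List String)) (j k : Nat)
    (hk : k < g.length) (hj : j < (g[k]'hk).length) :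
    getCell g (j : Int) (k : Int) = some ((g[k]'hk)[j]'hj) := by
  simp only [getCell]
  rw [if_pos ⟨Int.natCast_nonneg k, by exact_mod_cast hk⟩]
  have h1 : (k : Int).toNat = k := Int.toNat_natCast k
  simp only [h1, List.getD_eq_getElem g [] hk]
  rw [if_pos ⟨Int.natCast_nonneg j, by exact_mod_cast hj⟩]
  have h2 : (j : Int).toNat = j := Int.toNat_natCast j
  simp only [h2, List.getD_eq_getElem _ _ hj]

lemma filterMap_if {A B : Type} (l : List A) (p : A → Prop) [DecidablePred p] (g : A → B) :
    l.filterMap (fun a => if p a then some (g a) else none) =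
      (l.filter (fun a => decide (p a))).map g := by
  induction l with
  | nil => rfl
  | cons a l ih =>
    by_cases hp : p a <;> simp [hp, ih]

lemma mem_aliveInit (grid : List (List String)) (c : Int × Int) :
    c ∈ aliveInit grid ↔ aliveB grid c = true := by
  constructor
  · intro hc
    obtain ⟨yr, hyr, hin⟩ := List.mem_flatMap.mp hc
    obtain ⟨k, hk, rfl⟩ := (PySem.List.mem_enumerate_iff grid 0 yr).mp hyr
    obtain ⟨xc, hxc, heq⟩ := List.mem_filterMap.mp hin
    obtain ⟨j, hj, rfl⟩ := (PySem.List.mem_enumerate_iff _ 0 xc).mp hxc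
    simp only at heq
    split_ifs at heq with hcell
    rw [Option.some_inj] at heq
    subst heq
    rw [aliveB_iff]
    show getCell grid (0 + (j : Int)) (0 + (k : Int)) = some "@"
    rw [zero_add, zero_add, getCell_natCast grid j k hk hj, hcell]
  · intro hc
    have hA := (aliveB_iff grid c).mp hc
    obtain ⟨hy0, hyl, hx0, hxl, hval⟩ := getCell_some grid c.1 c.2 "@" hA
    rw [List.getD_eq_getElem grid [] hyl] at hxl
    apply List.mem_flatMap.mpr
    refine ⟨(0 + (c.2.toNat : Int), grid[c.2.toNat]'hyl),
      (PySem.List.mem_enumerate_iff grid 0 _).mpr ⟨c.2.toNat, hyl, rfl⟩, ?_⟩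
    apply List.mem_filterMap.mpr
    refine ⟨(0 + (c.1.toNat : Int), (grid[c.2.toNat]'hyl)[c.1.toNat]'hxl),
      (PySem.List.mem_enumerate_iff _ 0 _).mpr ⟨c.1.toNat, hxl, rfl⟩, ?_⟩
    have hcell : (grid[c.2.toNat]'hyl)[c.1.toNat]'hxl = "@" := by
      rw [List.getD_eq_getElem grid [] hyl] at hval
      rw [← hval]
      exact (List.getD_eq_getElem _ "" hxl).symm
    rw [hcell, if_pos rfl, Option.some_inj]
    rw [zero_add, zero_add, Int.toNat_of_nonneg hx0, Int.toNat_of_nonneg hy0]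

lemma nodup_aliveInit (grid : List (List String)) : (aliveInit grid).Nodup := by
  unfold aliveInit
  rw [List.flatMap_def, List.nodup_flatten]
  constructor
  · intro l hl
    obtain ⟨yr, hyr, rfl⟩ := List.mem_map.mp hl
    rw [filterMap_if (PySem.List.enumerate yr.2) (fun xc => xc.2 = "@") (fun xc => (xc.1, yr.1))]
    have hnd : (PySem.List.enumerate yr.2).Nodup :=
      (PySem.List.pairwise_lt_enumerate yr.2 0).imp (fun h => by
        intro he; rw [he] at h; exact lt_irrefl _ h)
    apply List.Nodup.map_on ?_ (hnd.filter _)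
    intro a ha b hb hab
    obtain ⟨k, hk, rfl⟩ := (PySem.List.mem_enumerate_iff _ 0 a).mp (List.mem_of_mem_filter ha)
    obtain ⟨k', hk', rfl⟩ := (PySem.List.mem_enumerate_iff _ 0 b).mp (List.mem_of_mem_filter hb)
    have := congrArg Prod.fst hab
    simp only at this
    have : k = k' := by omega
    subst this
    rfl
  · rw [List.pairwise_map]
    apply List.Pairwise.imp ?_ (PySem.List.pairwise_lt_enumerate grid 0)
    intro a b hab p hp hq
    obtain ⟨xc, _, heq⟩ := List.mem_filterMap.mp hp
    obtain ⟨xc', _, heq'⟩ := List.mem_filterMap.mp hq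
    split_ifs at heq heq' with h1 h2
    rw [Option.some_inj] at heq heq'
    have e1 := congrArg Prod.snd heq
    have e2 := congrArg Prod.snd heq'
    simp only at e1 e2
    rw [← e1] at e2
    omega

lemma part2_eq_alt (grid : List (List String)) : part2 grid = part2_alt grid := by
  obtain ⟨gf, hval, hmono, hstab, hgreat⟩ :=
    loopF_spec ((aliveL grid).length + 1) grid 0 (by omega)
  obtain ⟨F, hbval, hFN, hFsub, hFstab, hFgreat⟩ :=
    altLoop_spec ((aliveInit grid).length : Int) (aliveInit grid) (nodup_aliveInit grid)
  have hlen1 : (aliveL grid).length = (aliveInit grid).length :=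
    ((List.perm_ext_iff_of_nodup (nodup_aliveL grid) (nodup_aliveInit grid)).mpr
      (fun a => (mem_aliveL grid a).trans (mem_aliveInit grid a).symm)).length_eq
  have hsame : ∀ a, a ∈ aliveL gf ↔ a ∈ F := by
    intro a
    constructor
    · intro ha
      refine hFgreat (aliveL gf) ?_ ?_ a ha
      · intro c hc
        exact (mem_aliveInit grid c).mpr (hmono c ((mem_aliveL gf c).mp hc))
      · intro c hc
        have h4 := hstab c ((mem_aliveL gf c).mp hc)
        rw [countRolls_eq_supp gf c.1 c.2] at h4
        exact_mod_cast h4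
    · intro ha
      exact (mem_aliveL gf a).mpr
        (hgreat F (fun c hc => (mem_aliveInit grid c).mp (hFsub c hc)) hFstab a ha)
  have hlen2 : (aliveL gf).length = F.length :=
    ((List.perm_ext_iff_of_nodup (nodup_aliveL gf) hFN).mpr hsame).length_eq
  simp only [part2, part2_alt]
  rw [hval, hbval]
  omega

-- ===== VERDICT (by name: the statement is the Claim_ definition above) =====
theorem part2_spec : Claim_equal_part2 := by
  intro grid _
  unfold Spec_part2
  exact part2_eq_alt grid
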